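-- pv_equiv track=rewrite | github.com/denizarberk/cmpe150_project | deniz/input alıp yan yana çizdirme denemeleri.py | find_row_width
-- ===== SOURCE A (Python) =====
-- def find_row_width(row):
--     width = len(row) - 1
--     if "Dl" or "B" in row:  #DL ve B genişliğe ekleyor ama üstte onları da şekiller arasındaki boğluk olarak saydığımdan burada o fazladan saymayı çıkartıyorum
--         dashed_line_count= row.count("DL")
--         blank_count= row.count("B")
--         width=width-dashed_line_count-blank_count
--     for k in range(len(row)):
--         letter = str(row[k][0])
--         if letter == "V" or letter == "S" or letter == "O":
--             width = width + int(row[k][1: len(row[k])])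
--         elif letter=="T":
--             width=width+ (int(row[k][1: len(row[k])])*2)-1
--         elif letter == "R" or letter == "E":
--             x_index = row[k].index("x")
--             width = width + int(row[k][x_index+1: len(row[k])])
--         else:
--             continue
--     return width
-- ===== SOURCE B (Python) =====
-- def token_width(x):
--     # intrinsic width of one token: DL/B are pure separators (net -1, since the
--     # gap count charged below already gives them a gap)
--     if x == "DL" or x == "B":
--         return -1
--     c = x[0]
--     if c in ("V", "S", "O"):
--         return int(x[1:])
--     if c == "T":
--         return 2 * int(x[1:]) - 1
--     if c in ("R", "E"):
--         return int(x[x.index("x") + 1:])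
--     return 0
--
-- def find_row_width(row):
--     # Divide and conquer: an empty row has width -1, a single token its intrinsic
--     # width, and splitting a row in two adds exactly the one gap at the seam.
--     if not row:
--         return -1
--     if len(row) == 1:
--         return token_width(row[0])
--     mid = len(row) // 2
--     return find_row_width(row[:mid]) + 1 + find_row_width(row[mid:])
-- ===== Notes on version B (the rewrite author's own statement) =====
-- stated objective: alternative
-- what changed: B replaces A's count pre-passes plus index-based accumulator loop by a divide-and-conquer recursion: width([]) = -1, width([x]) = token_width(x), and width(L++R) = width(L) + 1 + width(R) at the midpoint, with a per-token intrinsic-width helper (DL/B count as net -1).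
import Mathlib
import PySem

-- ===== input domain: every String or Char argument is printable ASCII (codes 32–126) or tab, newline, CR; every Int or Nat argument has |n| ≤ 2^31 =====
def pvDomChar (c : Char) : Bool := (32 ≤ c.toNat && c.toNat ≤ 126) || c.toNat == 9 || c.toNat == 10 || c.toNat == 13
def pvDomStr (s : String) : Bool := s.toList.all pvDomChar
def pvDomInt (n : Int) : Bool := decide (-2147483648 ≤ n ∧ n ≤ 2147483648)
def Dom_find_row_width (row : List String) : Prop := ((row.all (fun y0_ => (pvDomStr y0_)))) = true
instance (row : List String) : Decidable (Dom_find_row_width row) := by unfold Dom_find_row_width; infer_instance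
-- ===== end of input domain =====

-- B replaces A's count pre-passes plus index loop by a divide-and-conquer
-- recursion (width([]) = -1; width([x]) = token_width(x); width(L++R) at the
-- midpoint = width(L) + 1 + width(R)) with a per-token intrinsic-width helper;
-- objective: alternative.


-- ===== PORT A =====
def find_row_width (row : List String) : Int :=
  let width : Int := PySem.List.len row - 1
  -- Python's guard `if "Dl" or "B" in row:` is always truthy ("Dl" is a nonempty
  -- string), so the count-subtraction block runs unconditionally.
  let dashed_line_count : Int := (PySem.List.count row "DL" : Int)
  let blank_count : Int := (PySem.List.count row "B" : Int)
  let width := width - dashed_line_count - blank_count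
  (PySem.List.pyRange 0 (PySem.List.len row) 1).foldl (fun width k =>
    let cs := (PySem.List.pyGetD row k "").toList
    match PySem.List.pyGet? cs 0 with
    | none => width  -- Python raises IndexError on row[k][0]; excluded by Pre_
    | some letter =>
      if letter = 'V' ∨ letter = 'S' ∨ letter = 'O' then
        width + (PySem.Int.ofChars? (PySem.List.slice cs (some 1) (some (PySem.Chars.len cs)))).getD 0
      else if letter = 'T' then
        width + (PySem.Int.ofChars? (PySem.List.slice cs (some 1) (some (PySem.Chars.len cs)))).getD 0 * 2 - 1
      else if letter = 'R' ∨ letter = 'E' then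
        -- row[k].index("x") raises ValueError when 'x' is absent (find = -1); excluded by Pre_
        let x_index := PySem.Chars.find cs ['x']
        width + (PySem.Int.ofChars? (PySem.List.slice cs (some (x_index + 1)) (some (PySem.Chars.len cs)))).getD 0
      else width) width

-- ===== PORT B =====
def token_width (x : String) : Int :=
  if x = "DL" ∨ x = "B" then -1
  else
    let cs := x.toList
    match PySem.List.pyGet? cs 0 with
    | none => 0  -- Python raises IndexError on x[0]; excluded by Pre_
    | some c =>
      if c ∈ ['V', 'S', 'O'] then
        (PySem.Int.ofChars? (PySem.List.slice cs (some 1) none)).getD 0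
      else if c = 'T' then
        2 * (PySem.Int.ofChars? (PySem.List.slice cs (some 1) none)).getD 0 - 1
      else if c ∈ ['R', 'E'] then
        -- x.index("x") raises ValueError when 'x' is absent (find = -1); excluded by Pre_
        (PySem.Int.ofChars? (PySem.List.slice cs (some (PySem.Chars.find cs ['x'] + 1)) none)).getD 0
      else 0

def find_row_width_alt : List String → Int
  | [] => -1
  | [x] => token_width x
  | a :: b :: rest =>
    -- Python's len(row)//2 on a nonnegative length is Nat division
    let mid := (a :: b :: rest).length / 2
    find_row_width_alt ((a :: b :: rest).take mid) + 1
      + find_row_width_alt ((a :: b :: rest).drop mid)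
  termination_by row => row.length
  decreasing_by
  · simp [List.length_take, List.length_cons]; omega
  · simp [List.length_drop]; omega

-- ===== PRECONDITION & SPEC =====
-- An element is accepted by A iff it is nonempty and, when its first character names
-- a shape, its numeric part parses as a Python int: after V/S/O/T the rest of the
-- string, after R/E the part after a required 'x'.
def pvShapeOk (cs : List Char) : Bool :=
  match cs with
  | [] => false
  | c :: rest =>
    if c = 'V' ∨ c = 'S' ∨ c = 'O' ∨ c = 'T' then
      (PySem.Int.ofChars? rest).isSome
    else if c = 'R' ∨ c = 'E' then
      PySem.Chars.find (c :: rest) ['x'] != -1 &&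
      (PySem.Int.ofChars? (PySem.List.slice (c :: rest)
        (some (PySem.Chars.find (c :: rest) ['x'] + 1)) none)).isSome
    else true

-- Pre_ excludes exactly the inputs on which the Python A raises (IndexError on an
-- empty element, ValueError from int() or from .index("x")).
def Pre_find_row_width (row : List String) : Prop :=
  (row.all (fun s => pvShapeOk s.toList)) = true
instance (row : List String) : Decidable (Pre_find_row_width row) := by
  unfold Pre_find_row_width; infer_instance

def pvWitness_find_row_width : List String := ["V3", "DL", "T2", "B", "Rx10", "E2x4"]

def Spec_find_row_width (row : List String) (out : Int) : Prop := out = find_row_width_alt row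
instance (row : List String) (out : Int) : Decidable (Spec_find_row_width row out) := by unfold Spec_find_row_width; infer_instance

-- ===== CLAIM (what is proved, stated in full; the proofs are below) =====
def Claim_equal_find_row_width : Prop := ∀ (row : List String), Dom_find_row_width row → Pre_find_row_width row → Spec_find_row_width row (find_row_width row)

-- ===== LEMMAS AND PROOFS =====

-- the shape contribution A's loop adds for one element (proof-only helper)
def pvContrib (cs : List Char) : Int :=
  match PySem.List.pyGet? cs 0 with
  | none => 0
  | some c =>
    if c = 'V' ∨ c = 'S' ∨ c = 'O' then
      (PySem.Int.ofChars? (PySem.List.slice cs (some 1) none)).getD 0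
    else if c = 'T' then
      (PySem.Int.ofChars? (PySem.List.slice cs (some 1) none)).getD 0 * 2 - 1
    else if c = 'R' ∨ c = 'E' then
      (PySem.Int.ofChars? (PySem.List.slice cs (some (PySem.Chars.find cs ['x'] + 1)) none)).getD 0
    else 0

-- a slice xs[a:len(xs)] with 0 ≤ a is xs[a:]
lemma pv_slice_some_len (cs : List Char) (i : Int) (h : 0 ≤ i) :
    PySem.List.slice cs (some i) (some (PySem.Chars.len cs)) = PySem.List.slice cs (some i) none := by
  simp [PySem.List.slice, PySem.List.clampIdx]
  split_ifs <;> omega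

lemma pv_slice_find_len (cs : List Char) :
    PySem.List.slice cs (some (PySem.Chars.find cs ['x'] + 1)) (some (PySem.Chars.len cs)) =
    PySem.List.slice cs (some (PySem.Chars.find cs ['x'] + 1)) none := by
  have := PySem.Chars.neg_one_le_find cs ['x']
  exact pv_slice_some_len cs _ (by omega)

-- A's loop body, as a function of the current element (proof-only helper)
def pvBodyA (width : Int) (s : String) : Int :=
  let cs := s.toList
  match PySem.List.pyGet? cs 0 with
  | none => width
  | some letter =>
    if letter = 'V' ∨ letter = 'S' ∨ letter = 'O' then
      width + (PySem.Int.ofChars? (PySem.List.slice cs (some 1) (some (PySem.Chars.len cs)))).getD 0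
    else if letter = 'T' then
      width + (PySem.Int.ofChars? (PySem.List.slice cs (some 1) (some (PySem.Chars.len cs)))).getD 0 * 2 - 1
    else if letter = 'R' ∨ letter = 'E' then
      let x_index := PySem.Chars.find cs ['x']
      width + (PySem.Int.ofChars? (PySem.List.slice cs (some (x_index + 1)) (some (PySem.Chars.len cs)))).getD 0
    else width

lemma pvBodyA_eq : pvBodyA = fun w s => w + pvContrib s.toList := by
  funext w s
  simp only [pvBodyA, pvContrib, pv_slice_find_len, pv_slice_some_len s.toList 1 (by omega)]
  cases PySem.List.pyGet? s.toList 0 with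
  | none => simp
  | some c => dsimp only; split_ifs <;> ring

-- A's whole computation, as len - 1 - counts + a sum of contributions
lemma pvA_eq (row : List String) :
    find_row_width row = PySem.List.len row - 1 - (PySem.List.count row "DL" : Int)
      - (PySem.List.count row "B" : Int) + (row.map (fun s => pvContrib s.toList)).sum := by
  have hA : find_row_width row =
      (PySem.List.pyRange 0 (PySem.List.len row) 1).foldl
        (fun acc j => pvBodyA acc (PySem.List.pyGetD row j ""))
        (PySem.List.len row - 1 - (PySem.List.count row "DL" : Int)
          - (PySem.List.count row "B" : Int)) := rfl
  rw [hA, PySem.List.foldl_pyRange_zero_pyGetD, pvBodyA_eq, PySem.List.foldl_add]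

-- per-token bridge: B's intrinsic width is A's contribution minus the DL/B indicators
lemma token_width_eq (s : String) :
    token_width s = pvContrib s.toList - (if s = "DL" then (1:Int) else 0)
      - (if s = "B" then (1:Int) else 0) := by
  by_cases hDL : s = "DL"
  · subst hDL; decide
  by_cases hB : s = "B"
  · subst hB; decide
  simp only [token_width, hDL, hB, or_self, if_false, if_neg, pvContrib,
    List.mem_cons, List.not_mem_nil, or_false]
  cases PySem.List.pyGet? s.toList 0 with
  | none => simp
  | some c => dsimp only; split_ifs <;> ring

-- B's recursion in closed form
lemma pvB_eq (row : List String) :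
    find_row_width_alt row = PySem.List.len row - 1 + (row.map token_width).sum := by
  fun_induction find_row_width_alt row with
  | case1 => simp [PySem.List.len_eq]
  | case2 x => simp [PySem.List.len_eq]
  | case3 a b rest mid ih1 ih2 =>
    rw [ih1, ih2]
    have hlen : (List.take mid (a :: b :: rest)).length = mid := by
      have h2 : (a :: b :: rest).length = rest.length + 2 := by simp
      simp only [List.length_take]
      omega
    have hsum : ((List.take mid (a :: b :: rest)).map token_width).sum
        + ((List.drop mid (a :: b :: rest)).map token_width).sum
        = ((a :: b :: rest).map token_width).sum := by
      rw [← List.sum_append, ← List.map_append, List.take_append_drop]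
    simp only [PySem.List.len_eq, hlen, List.length_drop] at *
    omega

lemma pv_count_sum (row : List String) (v : String) :
    ((PySem.List.count row v : Int)) = (row.map (fun s => if s = v then (1:Int) else 0)).sum := by
  induction row with
  | nil => simp [PySem.List.count_eq]
  | cons s t ih =>
    simp only [PySem.List.count_eq, List.count_cons, List.map_cons, List.sum_cons] at *
    rw [← ih]
    push_cast
    by_cases h : s = v <;> simp [h] <;> ring

lemma pv_sum_split (row : List String) :
    (row.map token_width).sum = (row.map (fun s => pvContrib s.toList)).sum
      - (row.map (fun s => if s = "DL" then (1:Int) else 0)).sum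
      - (row.map (fun s => if s = "B" then (1:Int) else 0)).sum := by
  induction row with
  | nil => simp
  | cons s t ih => simp only [List.map_cons, List.sum_cons, ih, token_width_eq s]; ring

-- ===== VERDICT (by name: the statement is the Claim_ definition above) =====
theorem find_row_width_spec : Claim_equal_find_row_width := by
  intro row _ _
  show find_row_width row = find_row_width_alt row
  rw [pvA_eq, pvB_eq, pv_count_sum row "DL", pv_count_sum row "B", pv_sum_split]
  ring
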